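-- pv_equiv track=rewrite | github.com/Eterniitys/projet_c | hash/src/test_hash.py | hash_kilian
-- ===== SOURCE A (Python) =====
-- def hash_kilian(string):
-- 	output = [0,42,69]
-- 	index = 0
--
-- 	for char in string:
-- 		#output[index] = output[index] ^ (ord(char)+index) % 256
-- 		output[index] = output[index] ^ (ord(char)+index) % 256
-- 		index = (index + 1) % 3
-- 	o = (output[0] + output[1] + output[2]) % 256
-- 	return o
-- ===== SOURCE B (Python) =====
-- def hash_kilian(string):
--     lanes = ([], [], [])
--     for k, ch in enumerate(string):
--         lanes[k % 3].append(ch)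
--     total = 0
--     for j, seed in ((0, 0), (1, 42), (2, 69)):
--         acc = seed
--         for ch in lanes[j]:
--             acc ^= (ord(ch) + j) % 256
--         total += acc
--     return total % 256
-- ===== Notes on version B (the rewrite author's own statement) =====
-- stated objective: alternative
-- what changed: Replaces A's single round-robin loop over a mutable 3-element list with a rotating index by a partition of the string into three positional lanes (k % 3) that are then XOR-folded independently with their own seed and offset, summing the three lane results.
import Mathlib
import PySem

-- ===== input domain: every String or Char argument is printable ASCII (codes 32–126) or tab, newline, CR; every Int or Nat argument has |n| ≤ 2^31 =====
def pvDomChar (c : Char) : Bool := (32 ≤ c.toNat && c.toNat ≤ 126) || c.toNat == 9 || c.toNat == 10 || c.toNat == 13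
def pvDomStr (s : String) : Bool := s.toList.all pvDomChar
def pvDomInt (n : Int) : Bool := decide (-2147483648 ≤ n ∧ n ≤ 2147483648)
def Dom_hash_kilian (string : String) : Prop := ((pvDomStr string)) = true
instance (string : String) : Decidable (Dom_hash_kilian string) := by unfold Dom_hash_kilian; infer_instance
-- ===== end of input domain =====

-- B replaces A's single round-robin loop (rotating index into a mutable 3-list) with a
-- partition of the string into three positional lanes folded independently (alternative decomposition).


-- ===== PORT A =====
-- loop body: output[index] ^= (ord(char)+index) % 256 ; index = (index+1) % 3
def hkStepA (st : List Int × Int) (ch : Char) : List Int × Int :=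
  let output := st.1
  let index := st.2
  let output := PySem.List.pySetD output index
      (PySem.Int.bxor (PySem.List.pyGetD output index 0)
        (PySem.Int.mod ((ch.toNat : Int) + index) 256))
  (output, PySem.Int.mod (index + 1) 3)

def hash_kilian (string : String) : Int :=
  let st := string.toList.foldl hkStepA ([0, 42, 69], 0)
  PySem.Int.mod (PySem.List.pyGetD st.1 0 0 + PySem.List.pyGetD st.1 1 0 + PySem.List.pyGetD st.1 2 0) 256

-- ===== PORT B =====
-- build the three positional lanes: lanes[k % 3].append(ch)
def hkLanes (cs : List Char) : List Char × List Char × List Char :=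
  (PySem.List.enumerate cs 0).foldl
    (fun l p =>
      if PySem.Int.mod p.1 3 = 0 then (l.1 ++ [p.2], l.2.1, l.2.2)
      else if PySem.Int.mod p.1 3 = 1 then (l.1, l.2.1 ++ [p.2], l.2.2)
      else (l.1, l.2.1, l.2.2 ++ [p.2]))
    ([], [], [])

-- inner loop: acc ^= (ord(ch) + j) % 256 over one lane
def hkLaneAcc (j : Int) (seed : Int) (lane : List Char) : Int :=
  lane.foldl (fun acc ch => PySem.Int.bxor acc (PySem.Int.mod ((ch.toNat : Int) + j) 256)) seed

def hash_kilian_alt (string : String) : Int :=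
  let lanes := hkLanes string.toList
  PySem.Int.mod (hkLaneAcc 0 0 lanes.1 + hkLaneAcc 1 42 lanes.2.1 + hkLaneAcc 2 69 lanes.2.2) 256

-- ===== PRECONDITION & SPEC =====
def Spec_hash_kilian (string : String) (out : Int) : Prop := out = hash_kilian_alt string
instance (string : String) (out : Int) : Decidable (Spec_hash_kilian string out) := by unfold Spec_hash_kilian; infer_instance

-- ===== CLAIM (what is proved, stated in full; the proofs are below) =====
def Claim_equal_hash_kilian : Prop := ∀ (string : String), Dom_hash_kilian string → Spec_hash_kilian string (hash_kilian string)

-- ===== LEMMAS AND PROOFS =====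

-- the three positional strides of a list (elements at positions ≡ 0/1/2 mod 3)
def split3 {α : Type} : List α → List α × List α × List α
  | [] => ([], [], [])
  | x :: xs =>
    let s := split3 xs
    (x :: s.2.2, s.1, s.2.1)

-- hkLanes's fold from start index s distributes the strides, rotated by s % 3
theorem hkLanes_build (cs : List Char) : ∀ (s : Nat) (l0 l1 l2 : List Char),
    (PySem.List.enumerate cs (s : Int)).foldl
      (fun l p =>
        if PySem.Int.mod p.1 3 = 0 then (l.1 ++ [p.2], l.2.1, l.2.2)
        else if PySem.Int.mod p.1 3 = 1 then (l.1, l.2.1 ++ [p.2], l.2.2)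
        else (l.1, l.2.1, l.2.2 ++ [p.2])) (l0, l1, l2) =
    (if s % 3 = 0 then (l0 ++ (split3 cs).1, l1 ++ (split3 cs).2.1, l2 ++ (split3 cs).2.2)
     else if s % 3 = 1 then (l0 ++ (split3 cs).2.2, l1 ++ (split3 cs).1, l2 ++ (split3 cs).2.1)
     else (l0 ++ (split3 cs).2.1, l1 ++ (split3 cs).2.2, l2 ++ (split3 cs).1)) := by
  induction cs with
  | nil =>
    intro s l0 l1 l2
    simp only [PySem.List.enumerate_nil, List.foldl_nil, split3]
    split_ifs <;> simp
  | cons x xs ih =>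
    intro s l0 l1 l2
    rw [PySem.List.enumerate_cons, List.foldl_cons]
    have hc : ((s : Int) + 1) = ((s + 1 : Nat) : Int) := by push_cast; ring
    have hm0 := PySem.Int.mod_natCast s 3
    rcases (by omega : s % 3 = 0 ∨ s % 3 = 1 ∨ s % 3 = 2) with h | h | h
    · have hm : PySem.Int.mod ((s : Int)) 3 = 0 := by rw [h] at hm0; exact_mod_cast hm0
      simp only [hm, hc, h]; norm_num
      have h1 : (s + 1) % 3 = 1 := by omega
      have h2 := ih (s + 1) (l0 ++ [x]) l1 l2
      rw [h1] at h2; norm_num at h2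
      rw [h2]; simp [split3]
    · have hm : PySem.Int.mod ((s : Int)) 3 = 1 := by rw [h] at hm0; exact_mod_cast hm0
      simp only [hm, hc, h]; norm_num
      have h1 : (s + 1) % 3 = 2 := by omega
      have h2 := ih (s + 1) l0 (l1 ++ [x]) l2
      rw [h1] at h2; norm_num at h2
      rw [h2]; simp [split3]
    · have hm : PySem.Int.mod ((s : Int)) 3 = 2 := by rw [h] at hm0; exact_mod_cast hm0
      simp only [hm, hc, h]; norm_num
      have h1 : (s + 1) % 3 = 0 := by omega
      have h2 := ih (s + 1) l0 l1 (l2 ++ [x])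
      rw [h1] at h2; norm_num at h2
      rw [h2]; simp [split3]

theorem hkLanes_eq_split3 (cs : List Char) : hkLanes cs = split3 cs := by
  have h := hkLanes_build cs 0 [] [] []
  norm_num at h
  simpa [hkLanes] using h

-- A's round-robin loop from each of the three possible index values computes lane folds
theorem aloop_eq (cs : List Char) : ∀ a b c : Int,
    (cs.foldl hkStepA ([a, b, c], 0) =
      ([hkLaneAcc 0 a (split3 cs).1, hkLaneAcc 1 b (split3 cs).2.1, hkLaneAcc 2 c (split3 cs).2.2],
        PySem.Int.mod (0 + (cs.length : Int)) 3)) ∧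
    (cs.foldl hkStepA ([a, b, c], 1) =
      ([hkLaneAcc 0 a (split3 cs).2.2, hkLaneAcc 1 b (split3 cs).1, hkLaneAcc 2 c (split3 cs).2.1],
        PySem.Int.mod (1 + (cs.length : Int)) 3)) ∧
    (cs.foldl hkStepA ([a, b, c], 2) =
      ([hkLaneAcc 0 a (split3 cs).2.1, hkLaneAcc 1 b (split3 cs).2.2, hkLaneAcc 2 c (split3 cs).1],
        PySem.Int.mod (2 + (cs.length : Int)) 3)) := by
  induction cs with
  | nil => intro a b c; refine ⟨?_, ?_, ?_⟩ <;> simp [split3, hkLaneAcc]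
  | cons x xs ih =>
    intro a b c
    refine ⟨?_, ?_, ?_⟩
    · rw [List.foldl_cons,
        show hkStepA ([a, b, c], 0) x =
          ([PySem.Int.bxor a (PySem.Int.mod ((x.toNat : Int) + 0) 256), b, c], 1) by
            simp [hkStepA, PySem.List.pySetD, PySem.List.pySet?, PySem.List.pyGetD,
              PySem.List.pyIdx?],
        (ih _ b c).2.1]
      simp only [Prod.mk.injEq]
      refine ⟨by simp [split3, hkLaneAcc], ?_⟩
      simp only [PySem.Int.mod_eq_emod_of_pos (show (0:Int) < 3 by norm_num), List.length_cons]
      push_cast; omega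
    · rw [List.foldl_cons,
        show hkStepA ([a, b, c], 1) x =
          ([a, PySem.Int.bxor b (PySem.Int.mod ((x.toNat : Int) + 1) 256), c], 2) by
            simp [hkStepA, PySem.List.pySetD, PySem.List.pySet?, PySem.List.pyGetD,
              PySem.List.pyIdx?],
        (ih a _ c).2.2]
      simp only [Prod.mk.injEq]
      refine ⟨by simp [split3, hkLaneAcc], ?_⟩
      simp only [PySem.Int.mod_eq_emod_of_pos (show (0:Int) < 3 by norm_num), List.length_cons]
      push_cast; omega
    · rw [List.foldl_cons,
        show hkStepA ([a, b, c], 2) x =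
          ([a, b, PySem.Int.bxor c (PySem.Int.mod ((x.toNat : Int) + 2) 256)], 0) by
            simp [hkStepA, PySem.List.pySetD, PySem.List.pySet?, PySem.List.pyGetD,
              PySem.List.pyIdx?],
        (ih a b _).1]
      simp only [Prod.mk.injEq]
      refine ⟨by simp [split3, hkLaneAcc], ?_⟩
      simp only [PySem.Int.mod_eq_emod_of_pos (show (0:Int) < 3 by norm_num), List.length_cons]
      push_cast; omega

-- ===== VERDICT (by name: the statement is the Claim_ definition above) =====
theorem hash_kilian_spec : Claim_equal_hash_kilian := by
  intro s _
  unfold Spec_hash_kilian hash_kilian hash_kilian_alt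
  rw [hkLanes_eq_split3, (aloop_eq s.toList 0 42 69).1]
  simp [PySem.List.pyGetD]
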